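-- pv_equiv track=rewrite | github.com/gokhanozdemir-git/cargo_tracking | backendd/yoneticiekrani/views.py | _get_trip_status
-- ===== SOURCE A (Python) =====
-- def _get_trip_status(stops):
--     """Trip'in genel durumunu hesapla."""
--     if not stops:
--         return "empty"
--
--     all_cargos = []
--     for stop in stops:
--         all_cargos.extend(stop.get("cargos", []))
--
--     if not all_cargos:
--         return "empty"
--
--     statuses = [c.get("status") for c in all_cargos]
--
--     if all(s == "delivered" for s in statuses):
--         return "completed"
--     elif all(s == "pending" for s in statuses):
--         return "pending"
--     elif any(s == "in_transit" for s in statuses):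
--         return "in_transit"
--     else:
--         return "partial"
-- ===== SOURCE B (Python) =====
-- def _get_trip_status(stops):
--     """Trip'in genel durumunu hesapla."""
--     if not stops:
--         return "empty"
--
--     # one-pass state machine: fold each cargo's status into a 5-state summary
--     # acc: None=no cargo yet, "D"=all delivered, "P"=all pending,
--     #      "T"=in_transit seen, "O"=all one other status, "M"=mixed (no transit)
--     acc = None
--     for stop in stops:
--         for c in stop.get("cargos", []):
--             s = c.get("status")
--             if s == "delivered":
--                 x = "D"
--             elif s == "pending":
--                 x = "P"
--             elif s == "in_transit":
--                 x = "T"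
--             else:
--                 x = "O"
--             if acc is None:
--                 acc = x
--             elif acc == "T" or x == "T":
--                 acc = "T"
--             elif acc != x:
--                 acc = "M"
--
--     if acc is None:
--         return "empty"
--     if acc == "D":
--         return "completed"
--     if acc == "P":
--         return "pending"
--     if acc == "T":
--         return "in_transit"
--     return "partial"
-- ===== Notes on version B (the rewrite author's own statement) =====
-- stated objective: alternative
-- what changed: Replaces A's staged passes (build all_cargos list, build statuses list, then three separate all/all/any scans) by a single pass folding each status through a small 5-state summary automaton (join of a status lattice), decoded at the end.
import Mathlib
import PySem

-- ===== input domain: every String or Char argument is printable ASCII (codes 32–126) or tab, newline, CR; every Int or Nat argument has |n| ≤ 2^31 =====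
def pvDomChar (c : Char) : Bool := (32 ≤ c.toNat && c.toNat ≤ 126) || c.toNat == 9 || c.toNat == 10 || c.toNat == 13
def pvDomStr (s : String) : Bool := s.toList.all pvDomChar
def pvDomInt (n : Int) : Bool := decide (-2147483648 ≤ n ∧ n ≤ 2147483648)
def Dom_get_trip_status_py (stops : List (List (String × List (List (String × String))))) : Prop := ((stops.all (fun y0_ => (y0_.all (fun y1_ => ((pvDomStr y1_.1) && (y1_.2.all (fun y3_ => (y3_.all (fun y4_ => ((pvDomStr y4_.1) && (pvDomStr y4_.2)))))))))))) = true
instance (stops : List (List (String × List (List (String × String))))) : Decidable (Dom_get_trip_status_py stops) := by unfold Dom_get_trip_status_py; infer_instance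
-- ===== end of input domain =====

-- B replaces A's staged passes (collect all cargos, map to statuses, three all/any scans)
-- by one pass folding each status through a 5-state summary automaton, decoded at the end
-- (objective: alternative).
-- ===== PORT A =====
-- Literal transliteration of A: build all_cargos by extending, map to statuses, three all/any scans.
def get_trip_status_py (stops : List (List (String × List (List (String × String))))) : String :=
  if stops = [] then "empty"
  else
    let all_cargos := stops.foldl (fun acc stop => acc ++ (PySem.Dict.mk stop).getD "cargos" []) []
    if all_cargos = [] then "empty"
    else
      let statuses := all_cargos.map (fun c => (PySem.Dict.mk c).get? "status")
      if statuses.all (fun s => s == some "delivered") then "completed"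
      else if statuses.all (fun s => s == some "pending") then "pending"
      else if statuses.any (fun s => s == some "in_transit") then "in_transit"
      else "partial"

-- ===== PORT B =====
-- classify one status into its summary letter (B's if/elif chain computing x)
def pvClassify (s : Option String) : Char :=
  if s = some "delivered" then 'D'
  else if s = some "pending" then 'P'
  else if s = some "in_transit" then 'T'
  else 'O'

-- B's inner update of acc
def pvStep (a : Option Char) (s : Option String) : Option Char :=
  let x := pvClassify s
  match a with
  | none => some x
  | some c => if c = 'T' ∨ x = 'T' then some 'T' else if c ≠ x then some 'M' else some c

-- Port of B: one pass folding every cargo's status through pvStep, then decode.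
def get_trip_status_py_alt (stops : List (List (String × List (List (String × String))))) : String :=
  if stops = [] then "empty"
  else
    let acc := stops.foldl (fun a stop =>
      ((PySem.Dict.mk stop).getD "cargos" []).foldl
        (fun a c => pvStep a ((PySem.Dict.mk c).get? "status")) a) none
    if acc = none then "empty"
    else if acc = some 'D' then "completed"
    else if acc = some 'P' then "pending"
    else if acc = some 'T' then "in_transit"
    else "partial"

-- ===== PRECONDITION & SPEC =====
def Spec_get_trip_status_py (stops : List (List (String × List (List (String × String))))) (out : String) : Prop := out = get_trip_status_py_alt stops
instance (stops : List (List (String × List (List (String × String))))) (out : String) : Decidable (Spec_get_trip_status_py stops out) := by unfold Spec_get_trip_status_py; infer_instance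

-- ===== CLAIM (what is proved, stated in full; the proofs are below) =====
def Claim_equal_get_trip_status_py : Prop := ∀ (stops : List (List (String × List (List (String × String))))), Dom_get_trip_status_py stops → Spec_get_trip_status_py stops (get_trip_status_py stops)

-- ===== LEMMAS AND PROOFS =====
-- A's foldl-append accumulation is flatMap
theorem pv_foldl_append_eq_flatMap {σ γ : Type} (cargos : σ → List γ) (stops : List σ) :
    stops.foldl (fun acc stop => acc ++ cargos stop) [] = stops.flatMap cargos := by
  have h : ∀ (l : List σ) (acc : List γ),
      l.foldl (fun acc stop => acc ++ cargos stop) acc = acc ++ l.flatMap cargos := by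
    intro l
    induction l with
    | nil => simp
    | cons h t ih => intro acc; simp [List.foldl_cons, ih, List.flatMap_cons]
  simpa using h stops []

-- B's nested fold is a fold of pvStep over the statuses of the flattened cargo list
theorem pv_fold_fusion {σ γ : Type} (cargos : σ → List γ) (g : γ → Option String)
    (stops : List σ) (a0 : Option Char) :
    stops.foldl (fun a stop => (cargos stop).foldl (fun a c => pvStep a (g c)) a) a0
      = ((stops.flatMap cargos).map g).foldl pvStep a0 := by
  induction stops generalizing a0 with
  | nil => simp
  | cons h t ih => simp [List.flatMap_cons, List.map_append, List.foldl_append, ih, List.foldl_map]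

-- once the accumulator is set it never returns to none
theorem pv_fold_some (ss : List (Option String)) (c : Char) :
    ss.foldl pvStep (some c) ≠ none := by
  induction ss generalizing c with
  | nil => simp
  | cons h t ih =>
      simp only [List.foldl_cons, pvStep]
      split_ifs <;> exact ih _

-- 'T' is absorbing
theorem pv_fold_T (ss : List (Option String)) :
    ss.foldl pvStep (some 'T') = some 'T' := by
  induction ss with
  | nil => rfl
  | cons h t ih => simpa [pvStep] using ih

-- starting from 'M' the fold stays in {'M','T'}
theorem pv_fold_M (ss : List (Option String)) :
    ss.foldl pvStep (some 'M') = some 'M' ∨ ss.foldl pvStep (some 'M') = some 'T' := by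
  induction ss with
  | nil => exact Or.inl rfl
  | cons h t ih =>
      simp only [List.foldl_cons, pvStep]
      split_ifs with h1 h2
      · exact Or.inr (pv_fold_T t)
      · exact ih
      · exact ih

-- from a letter c ∉ {'T','M'} the fold can only end at c, 'T' or 'M'
theorem pv_fold_cases (ss : List (Option String)) (c : Char) (_hT : c ≠ 'T') (_hM : c ≠ 'M') :
    ss.foldl pvStep (some c) = some c ∨ ss.foldl pvStep (some c) = some 'T' ∨
      ss.foldl pvStep (some c) = some 'M' := by
  induction ss with
  | nil => exact Or.inl rfl
  | cons h t ih =>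
      simp only [List.foldl_cons, pvStep]
      split_ifs with h1 h2
      · exact Or.inr (Or.inl (pv_fold_T t))
      · rcases pv_fold_M t with hm | hm
        · exact Or.inr (Or.inr hm)
        · exact Or.inr (Or.inl hm)
      · exact ih

-- the fold ends in 'T' iff a 'T' status occurs (when not started at 'T')
theorem pv_fold_T_iff (ss : List (Option String)) (a : Option Char) (ha : a ≠ some 'T') :
    (ss.foldl pvStep a = some 'T') ↔ ∃ s ∈ ss, pvClassify s = 'T' := by
  induction ss generalizing a with
  | nil => simp [List.foldl_nil]; intro hc; exact absurd hc ha
  | cons h t ih =>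
      simp only [List.foldl_cons]
      by_cases hT : pvClassify h = 'T'
      · have hstep : pvStep a h = some 'T' := by
          cases a with
          | none => simp [pvStep, hT]
          | some c => simp [pvStep, hT]
        rw [hstep, pv_fold_T]
        simp [hT]
      · have hstep : pvStep a h ≠ some 'T' := by
          cases a with
          | none => simp [pvStep]; intro hc; exact hT hc
          | some c =>
              have hc : c ≠ 'T' := fun hc => ha (by rw [hc])
              simp only [pvStep]
              split_ifs with h1 h2 <;> simp_all
        rw [ih _ hstep]
        constructor
        · rintro ⟨s, hs, hcl⟩; exact ⟨s, List.mem_cons_of_mem _ hs, hcl⟩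
        · rintro ⟨s, hs, hcl⟩
          rcases List.mem_cons.mp hs with rfl | hs
          · exact absurd hcl hT
          · exact ⟨s, hs, hcl⟩

-- starting from a letter c ∉ {'T','M'}, the fold stays at c iff every status classifies to c
theorem pv_fold_keep (ss : List (Option String)) (c : Char) (hT : c ≠ 'T') (hM : c ≠ 'M') :
    (ss.foldl pvStep (some c) = some c) ↔ ∀ s ∈ ss, pvClassify s = c := by
  induction ss with
  | nil => simp
  | cons h t ih =>
      simp only [List.foldl_cons]
      by_cases hx : pvClassify h = c
      · have hstep : pvStep (some c) h = some c := by
          simp only [pvStep, hx]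
          rw [if_neg (by simp [hT]), if_neg (by simp)]
        rw [hstep, ih]
        constructor
        · intro hall s hs
          rcases List.mem_cons.mp hs with rfl | hs
          · exact hx
          · exact hall s hs
        · intro hall s hs; exact hall s (List.mem_cons_of_mem _ hs)
      · have hrhs : ¬ ∀ s ∈ h :: t, pvClassify s = c := fun hall => hx (hall h List.mem_cons_self)
        simp only [hrhs, iff_false]
        by_cases h1 : pvClassify h = 'T'
        · have hstep : pvStep (some c) h = some 'T' := by simp [pvStep, h1]
          rw [hstep, pv_fold_T]
          simp [Ne.symm hT]
        · have hstep : pvStep (some c) h = some 'M' := by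
            simp only [pvStep]
            rw [if_neg (by simp [hT, h1]), if_pos (fun e => hx e.symm)]
          rw [hstep]
          rcases pv_fold_M t with hm | hm <;> rw [hm] <;> simp [Ne.symm hM, Ne.symm hT]

-- starting from none on a nonempty list, the fold ends at letter c ∉ {'T','M'} iff all classify to c
theorem pv_fold_letter (s0 : Option String) (t : List (Option String)) (c : Char)
    (hT : c ≠ 'T') (hM : c ≠ 'M') :
    ((s0 :: t).foldl pvStep none = some c) ↔ ∀ s ∈ s0 :: t, pvClassify s = c := by
  have hfold : (s0 :: t).foldl pvStep none = t.foldl pvStep (some (pvClassify s0)) := by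
    simp [pvStep]
  rw [hfold]
  constructor
  · intro hc2
    by_cases h0 : pvClassify s0 = c
    · intro s hs
      rcases List.mem_cons.mp hs with rfl | hs
      · exact h0
      · rw [h0] at hc2
        exact (pv_fold_keep t c hT hM).mp hc2 s hs
    · exfalso
      by_cases h0T : pvClassify s0 = 'T'
      · rw [h0T, pv_fold_T] at hc2
        exact hT (Option.some.inj hc2).symm
      · by_cases h0M : pvClassify s0 = 'M'
        · rcases pv_fold_M t with hm | hm <;> rw [h0M] at hc2 <;> rw [hm] at hc2
          · exact hM (Option.some.inj hc2).symm
          · exact hT (Option.some.inj hc2).symm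
        · rcases pv_fold_cases t (pvClassify s0) h0T h0M with h' | h' | h' <;> rw [h'] at hc2
          · exact h0 (Option.some.inj hc2)
          · exact hT (Option.some.inj hc2).symm
          · exact hM (Option.some.inj hc2).symm
  · intro hall
    rw [hall s0 List.mem_cons_self]
    exact (pv_fold_keep t c hT hM).mpr (fun s hs => hall s (List.mem_cons_of_mem _ hs))

-- classification letters decode back to the original status comparisons
theorem pv_classify_D (s : Option String) : pvClassify s = 'D' ↔ s = some "delivered" := by
  unfold pvClassify; split_ifs <;> simp_all
theorem pv_classify_P (s : Option String) : pvClassify s = 'P' ↔ s = some "pending" := by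
  unfold pvClassify; split_ifs <;> simp_all
theorem pv_classify_T (s : Option String) : pvClassify s = 'T' ↔ s = some "in_transit" := by
  unfold pvClassify; split_ifs <;> simp_all

theorem pv_main (stops : List (List (String × List (List (String × String))))) :
    get_trip_status_py stops = get_trip_status_py_alt stops := by
  unfold get_trip_status_py get_trip_status_py_alt
  by_cases hs : stops = []
  · simp [hs]
  · rw [if_neg hs, if_neg hs]
    rw [pv_foldl_append_eq_flatMap (fun stop => (PySem.Dict.mk stop).getD "cargos" []) stops,
        pv_fold_fusion (fun stop => (PySem.Dict.mk stop).getD "cargos" [])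
          (fun c => (PySem.Dict.mk c).get? "status") stops none]
    set cargos := stops.flatMap (fun stop => (PySem.Dict.mk stop).getD "cargos" []) with hcdef
    by_cases hc : cargos = []
    · simp [hc]
    · have hss : cargos.map (fun c => (PySem.Dict.mk c).get? "status") ≠ [] := by simp [hc]
      obtain ⟨s0, t, hst⟩ := List.exists_cons_of_ne_nil hss
      rw [if_neg hc, hst]
      have hnone : (s0 :: t).foldl pvStep none ≠ none := by
        rw [show (s0 :: t).foldl pvStep none = t.foldl pvStep (some (pvClassify s0)) by
          simp [pvStep]]
        exact pv_fold_some t _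
      by_cases hD : ∀ s ∈ s0 :: t, s = some "delivered"
      · have hA : ((s0 :: t).all fun s => s == some "delivered") = true := by simpa using hD
        have hB : (s0 :: t).foldl pvStep none = some 'D' :=
          (pv_fold_letter s0 t 'D' (by decide) (by decide)).mpr
            (fun s hs => (pv_classify_D s).mpr (hD s hs))
        simp [hA, hB]
      · have hA : ¬ (((s0 :: t).all fun s => s == some "delivered") = true) := by simpa using hD
        have hB : ¬ (s0 :: t).foldl pvStep none = some 'D' := fun h =>
          hD (fun s hs => (pv_classify_D s).mp
            ((pv_fold_letter s0 t 'D' (by decide) (by decide)).mp h s hs))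
        by_cases hP : ∀ s ∈ s0 :: t, s = some "pending"
        · have hA2 : ((s0 :: t).all fun s => s == some "pending") = true := by simpa using hP
          have hB2 : (s0 :: t).foldl pvStep none = some 'P' :=
            (pv_fold_letter s0 t 'P' (by decide) (by decide)).mpr
              (fun s hs => (pv_classify_P s).mpr (hP s hs))
          simp [hA, hA2, hB2]
        · have hA2 : ¬ (((s0 :: t).all fun s => s == some "pending") = true) := by simpa using hP
          have hB2 : ¬ (s0 :: t).foldl pvStep none = some 'P' := fun h =>
            hP (fun s hs => (pv_classify_P s).mp
              ((pv_fold_letter s0 t 'P' (by decide) (by decide)).mp h s hs))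
          by_cases hT : ∃ s ∈ s0 :: t, s = some "in_transit"
          · have hA3 : ((s0 :: t).any fun s => s == some "in_transit") = true := by
              rw [List.any_eq_true]
              rcases hT with ⟨s, hsm, rfl⟩
              exact ⟨_, hsm, by simp⟩
            have hB3 : (s0 :: t).foldl pvStep none = some 'T' :=
              (pv_fold_T_iff (s0 :: t) none (by simp)).mpr
                (by rcases hT with ⟨s, hsm, h⟩; exact ⟨s, hsm, (pv_classify_T s).mpr h⟩)
            simp [hA, hA2, hA3, hB3]
          · have hA3 : ¬ (((s0 :: t).any fun s => s == some "in_transit") = true) := by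
              rw [List.any_eq_true]
              rintro ⟨s, hsm, hsv⟩
              exact hT ⟨s, hsm, by simpa using hsv⟩
            have hB3 : ¬ (s0 :: t).foldl pvStep none = some 'T' := fun h => by
              rcases (pv_fold_T_iff (s0 :: t) none (by simp)).mp h with ⟨s, hsm, hcl⟩
              exact hT ⟨s, hsm, (pv_classify_T s).mp hcl⟩
            rw [if_neg hA, if_neg hA2, if_neg hA3]
            show "partial" =
              if (s0 :: t).foldl pvStep none = none then "empty"
              else if (s0 :: t).foldl pvStep none = some 'D' then "completed"
              else if (s0 :: t).foldl pvStep none = some 'P' then "pending"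
              else if (s0 :: t).foldl pvStep none = some 'T' then "in_transit"
              else "partial"
            rw [if_neg hnone, if_neg hB, if_neg hB2, if_neg hB3]

-- ===== VERDICT (by name: the statement is the Claim_ definition above) =====
theorem get_trip_status_py_spec : Claim_equal_get_trip_status_py := by
  intro stops _
  unfold Spec_get_trip_status_py
  exact pv_main stops
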